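-- pv_equiv track=rewrite | github.com/toroleapinc/encephagen | experiments/18_integrated_cognition.py | classify_regions
-- ===== SOURCE A (Python) =====
-- def classify_regions(labels):
--     groups = {}
--     for key, patterns in [
--         ('visual', ['V1', 'V2', 'VAC']),
--         ('auditory', ['A1', 'A2']),
--         ('prefrontal', ['PFC', 'FEF']),
--         ('hippocampus', ['HC', 'PHC']),
--         ('amygdala', ['AMYG']),
--         ('basal_ganglia', ['BG']),
--         ('thalamus', ['TM']),
--         ('temporal', ['TC']),
--         ('motor', ['M1', 'PMC']),
--     ]:
--         groups[key] = [i for i, l in enumerate(labels)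
--                        if any(p in l.upper() for p in patterns)]
--     return groups
-- ===== SOURCE B (Python) =====
-- _PAT2KEY = {
--     'V1': 'visual', 'V2': 'visual', 'VAC': 'visual',
--     'A1': 'auditory', 'A2': 'auditory',
--     'PFC': 'prefrontal', 'FEF': 'prefrontal',
--     'HC': 'hippocampus', 'PHC': 'hippocampus',
--     'AMYG': 'amygdala',
--     'BG': 'basal_ganglia',
--     'TM': 'thalamus',
--     'TC': 'temporal',
--     'M1': 'motor', 'PMC': 'motor',
-- }
--
-- _KEYS = ['visual', 'auditory', 'prefrontal', 'hippocampus', 'amygdala',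
--          'basal_ganglia', 'thalamus', 'temporal', 'motor']
--
-- def classify_regions(labels):
--     # Hash-index substring scan: slide over each label once and look every
--     # window of length 2/3/4 up in a pattern->group dict, instead of testing
--     # each pattern with 'in' for each of the nine groups.
--     groups = {k: [] for k in _KEYS}
--     for i, l in enumerate(labels):
--         u = l.upper()
--         hits = []
--         for j in range(len(u)):
--             for L in (2, 3, 4):
--                 key = _PAT2KEY.get(u[j:j+L])
--                 if key is not None and key not in hits:
--                     hits.append(key)
--         for key in hits:
--             groups[key].append(i)
--     return groups
-- ===== Notes on version B (the rewrite author's own statement) =====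
-- stated objective: faster
-- what changed: B scans each label once with a sliding window, looking every substring window of length 2/3/4 up in a pattern->group hash index and appending the label's index to each group hit (deduplicated per label), instead of A's nine separate full scans of labels each testing every pattern with 'in'.
import Mathlib
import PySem

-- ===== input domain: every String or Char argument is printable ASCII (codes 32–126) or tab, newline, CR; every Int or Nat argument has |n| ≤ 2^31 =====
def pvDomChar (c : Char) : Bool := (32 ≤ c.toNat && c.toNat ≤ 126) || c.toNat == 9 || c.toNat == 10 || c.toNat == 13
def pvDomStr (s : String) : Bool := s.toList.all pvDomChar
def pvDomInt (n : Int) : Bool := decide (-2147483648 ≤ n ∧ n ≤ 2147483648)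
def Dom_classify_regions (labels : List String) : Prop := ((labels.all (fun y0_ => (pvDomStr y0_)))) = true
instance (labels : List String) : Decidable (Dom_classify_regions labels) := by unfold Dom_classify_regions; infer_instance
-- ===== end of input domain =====

-- B replaces A's nine per-group pattern scans by a single sliding-window scan of each label
-- that looks every window of length 2/3/4 up in a pattern->group dict; objective: faster (constant factor).

-- ===== PORT A =====
def pvTable : List (String × List String) :=
  [("visual", ["V1", "V2", "VAC"]),
   ("auditory", ["A1", "A2"]),
   ("prefrontal", ["PFC", "FEF"]),
   ("hippocampus", ["HC", "PHC"]),
   ("amygdala", ["AMYG"]),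
   ("basal_ganglia", ["BG"]),
   ("thalamus", ["TM"]),
   ("temporal", ["TC"]),
   ("motor", ["M1", "PMC"])]

def classify_regions (labels : List String) : List (String × List Int) :=
  (pvTable.foldl (fun groups kp =>
      groups.insert kp.1
        (((PySem.List.enumerate labels 0).filter
            (fun il => kp.2.any (fun p => PySem.Str.isIn p (PySem.Str.upper il.2)))).map (fun il => il.1)))
    PySem.Dict.empty).items

-- ===== PORT B =====
-- _PAT2KEY : pattern -> group key
def pvPat2Key : PySem.Dict String String := PySem.Dict.mk
  [("V1", "visual"), ("V2", "visual"), ("VAC", "visual"),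
   ("A1", "auditory"), ("A2", "auditory"),
   ("PFC", "prefrontal"), ("FEF", "prefrontal"),
   ("HC", "hippocampus"), ("PHC", "hippocampus"),
   ("AMYG", "amygdala"), ("BG", "basal_ganglia"),
   ("TM", "thalamus"), ("TC", "temporal"),
   ("M1", "motor"), ("PMC", "motor")]

def pvKeys : List String :=
  ["visual", "auditory", "prefrontal", "hippocampus", "amygdala",
   "basal_ganglia", "thalamus", "temporal", "motor"]

-- 'key = _PAT2KEY.get(u[j:j+L]); if key is not None and key not in hits: hits.append(key)'
def pvAdd (hs : List String) (o : Option String) : List String :=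
  match o with
  | some key => if hs.contains key then hs else hs ++ [key]
  | none => hs

-- the inner 'for j in range(len(u)): for L in (2, 3, 4): …' collecting hits
def pvHits (u : String) : List String :=
  (PySem.List.pyRange 0 (PySem.Str.len u) 1).foldl (fun hs j =>
    [(2 : Int), 3, 4].foldl (fun hs L =>
      pvAdd hs (pvPat2Key.get? (PySem.Str.slice u (some j) (some (j + L))))) hs) []

def classify_regions_alt (labels : List String) : List (String × List Int) :=
  let groups0 := pvKeys.foldl (fun d k => d.insert k ([] : List Int)) PySem.Dict.empty
  ((PySem.List.enumerate labels 0).foldl (fun d il =>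
      let u := PySem.Str.upper il.2
      (pvHits u).foldl (fun d key => d.modify key [] (fun xs => xs ++ [il.1])) d) groups0).items

-- ===== PRECONDITION & SPEC =====
def Spec_classify_regions (labels : List String) (out : List (String × List Int)) : Prop := out = classify_regions_alt labels
instance (labels : List String) (out : List (String × List Int)) : Decidable (Spec_classify_regions labels out) := by unfold Spec_classify_regions; infer_instance

-- ===== CLAIM (what is proved, stated in full; the proofs are below) =====
def Claim_equal_classify_regions : Prop := ∀ (labels : List String), Dom_classify_regions labels → Spec_classify_regions labels (classify_regions labels)


-- ===== LEMMAS AND PROOFS =====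

-- the nine-slot dict state both loops maintain
def pvMk (v1 v2 v3 v4 v5 v6 v7 v8 v9 : List Int) : PySem.Dict String (List Int) :=
  PySem.Dict.mk [("visual", v1), ("auditory", v2), ("prefrontal", v3), ("hippocampus", v4),
    ("amygdala", v5), ("basal_ganglia", v6), ("thalamus", v7), ("temporal", v8), ("motor", v9)]

-- a lookup hit for key k at window start j
def pvHitAt (u : String) (j : Int) (k : String) : Prop :=
  ∃ L ∈ [(2 : Int), 3, 4], pvPat2Key.get? (PySem.Str.slice u (some j) (some (j + L))) = some k

theorem pv_mem_pvAdd (hs : List String) (o : Option String) (k : String) :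
    k ∈ pvAdd hs o ↔ k ∈ hs ∨ o = some k := by
  cases o with
  | none => simp [pvAdd]
  | some key =>
    simp only [pvAdd]
    by_cases h : hs.contains key
    · rw [if_pos h]
      have hk : key ∈ hs := by simpa using h
      constructor
      · exact Or.inl
      · rintro (hx | hx)
        · exact hx
        · cases Option.some.inj hx; exact hk
    · rw [if_neg h]
      simp only [List.mem_append, List.mem_singleton, Option.some.injEq]
      constructor
      · rintro (hx | hx)
        · exact Or.inl hx
        · exact Or.inr hx.symm
      · rintro (hx | hx)
        · exact Or.inl hx
        · exact Or.inr hx.symm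

theorem pv_nodup_pvAdd (hs : List String) (o : Option String) (h : hs.Nodup) :
    (pvAdd hs o).Nodup := by
  cases o with
  | none => simpa [pvAdd]
  | some key =>
    simp only [pvAdd]
    by_cases hc : hs.contains key
    · rw [if_pos hc]; exact h
    · rw [if_neg hc]
      rw [List.nodup_append]
      refine ⟨h, List.nodup_singleton _, ?_⟩
      intro a ha b hb
      have hbk : b = key := by simpa using hb
      subst hbk
      intro hab
      subst hab
      exact hc (by simpa using ha)

theorem pv_mem_inner (u : String) (j : Int) (hs : List String) (k : String) :
    k ∈ [(2 : Int), 3, 4].foldl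
        (fun hs L => pvAdd hs (pvPat2Key.get? (PySem.Str.slice u (some j) (some (j + L))))) hs
      ↔ k ∈ hs ∨ pvHitAt u j k := by
  simp only [List.foldl_cons, List.foldl_nil, pv_mem_pvAdd, pvHitAt]
  simp only [List.mem_cons, List.not_mem_nil, or_false]
  constructor
  · rintro (((h | h) | h) | h)
    · exact Or.inl h
    · exact Or.inr ⟨2, by tauto, h⟩
    · exact Or.inr ⟨3, by tauto, h⟩
    · exact Or.inr ⟨4, by tauto, h⟩
  · rintro (h | ⟨L, (hL | hL | hL), h⟩) <;> subst_vars <;> tauto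

theorem pv_nodup_inner (u : String) (j : Int) (hs : List String) (h : hs.Nodup) :
    ([(2 : Int), 3, 4].foldl
        (fun hs L => pvAdd hs (pvPat2Key.get? (PySem.Str.slice u (some j) (some (j + L))))) hs).Nodup := by
  simp only [List.foldl_cons, List.foldl_nil]
  exact pv_nodup_pvAdd _ _ (pv_nodup_pvAdd _ _ (pv_nodup_pvAdd _ _ h))

theorem pv_mem_foldPos (u : String) (k : String) (js : List Int) : ∀ (hs : List String),
    k ∈ js.foldl (fun hs j =>
        [(2 : Int), 3, 4].foldl
          (fun hs L => pvAdd hs (pvPat2Key.get? (PySem.Str.slice u (some j) (some (j + L))))) hs) hs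
      ↔ k ∈ hs ∨ ∃ j ∈ js, pvHitAt u j k := by
  induction js with
  | nil => intro hs; simp
  | cons j js ih =>
    intro hs
    rw [List.foldl_cons, ih, pv_mem_inner]
    simp only [List.mem_cons]
    constructor
    · rintro ((h | h) | ⟨j', hj', h⟩)
      · exact Or.inl h
      · exact Or.inr ⟨j, Or.inl rfl, h⟩
      · exact Or.inr ⟨j', Or.inr hj', h⟩
    · rintro (h | ⟨j', (hj' | hj'), h⟩)
      · tauto
      · subst hj'; tauto
      · exact Or.inr ⟨j', hj', h⟩

theorem pv_nodup_foldPos (u : String) (js : List Int) : ∀ (hs : List String), hs.Nodup →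
    (js.foldl (fun hs j =>
        [(2 : Int), 3, 4].foldl
          (fun hs L => pvAdd hs (pvPat2Key.get? (PySem.Str.slice u (some j) (some (j + L))))) hs) hs).Nodup := by
  induction js with
  | nil => intro hs h; simpa
  | cons j js ih =>
    intro hs h
    rw [List.foldl_cons]
    exact ih _ (pv_nodup_inner u j hs h)

theorem pv_mem_pvHits (u : String) (k : String) :
    k ∈ pvHits u ↔ ∃ j ∈ PySem.List.pyRange 0 (PySem.Str.len u) 1, pvHitAt u j k := by
  unfold pvHits
  rw [pv_mem_foldPos]
  simp

theorem pv_nodup_pvHits (u : String) : (pvHits u).Nodup :=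
  pv_nodup_foldPos u _ [] List.nodup_nil

-- any successful lookup lands on one of the 15 (pattern, key) pairs
theorem pv_get?_mem {v : Type} (l : List (String × v)) (sub : String) (k : v)
    (h : (PySem.Dict.mk l).get? sub = some k) : (sub, k) ∈ l := by
  induction l with
  | nil =>
    rw [show (PySem.Dict.mk ([] : List (String × v))).get? sub = none from rfl] at h
    simp at h
  | cons p l ih =>
    obtain ⟨a, b⟩ := p
    rw [PySem.Dict.get?_mk_cons] at h
    by_cases hc : (a == sub) = true
    · rw [if_pos hc] at h
      injection h with h'
      have : a = sub := by simpa using hc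
      subst this; subst h'
      exact List.mem_cons_self ..
    · rw [if_neg hc] at h
      exact List.mem_cons_of_mem _ (ih h)

-- any successful lookup lands on one of the 15 (pattern, key) pairs
theorem pv_get?_cases (sub k : String) (h : pvPat2Key.get? sub = some k) :
    (sub, k) ∈ [("V1", "visual"), ("V2", "visual"), ("VAC", "visual"),
      ("A1", "auditory"), ("A2", "auditory"), ("PFC", "prefrontal"), ("FEF", "prefrontal"),
      ("HC", "hippocampus"), ("PHC", "hippocampus"), ("AMYG", "amygdala"), ("BG", "basal_ganglia"),
      ("TM", "thalamus"), ("TC", "temporal"), ("M1", "motor"), ("PMC", "motor")] :=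
  pv_get?_mem _ sub k h

theorem pv_get?_key (sub k : String) (h : pvPat2Key.get? sub = some k) : k ∈ pvKeys := by
  have := pv_get?_cases sub k h
  simp only [List.mem_cons, List.not_mem_nil, or_false, Prod.mk.injEq] at this
  simp only [pvKeys, List.mem_cons, List.not_mem_nil, or_false]
  tauto

theorem pv_sub_pvHits (u : String) : ∀ k ∈ pvHits u, k ∈ pvKeys := by
  intro k hk
  rw [pv_mem_pvHits] at hk
  obtain ⟨j, _, L, _, hget⟩ := hk
  exact pv_get?_key _ k hget

theorem pv_hitAt_to_isIn (u : String) (j : Int) (k : String) (hj : 0 ≤ j)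
    (h : pvHitAt u j k) :
    ∃ sub, pvPat2Key.get? sub = some k ∧ PySem.Str.isIn sub u = true := by
  obtain ⟨L, hL, hget⟩ := h
  have hL0 : 0 ≤ L := by
    simp only [List.mem_cons, List.not_mem_nil, or_false] at hL
    rcases hL with h | h | h <;> omega
  refine ⟨_, hget, ?_⟩
  rw [PySem.Str.isIn_iff_infix]
  rw [PySem.Str.toList_slice, PySem.Chars.slice_eq_listSlice]
  rw [PySem.List.slice_toNat u.toList hj (by omega)]
  exact ((List.take_prefix _ _).isInfix).trans ((List.drop_suffix _ _).isInfix)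

theorem pv_isIn_to_hitAt (u sub : String) (k : String) (hget : pvPat2Key.get? sub = some k)
    (hlen : sub.toList.length = 2 ∨ sub.toList.length = 3 ∨ sub.toList.length = 4)
    (hin : PySem.Str.isIn sub u = true) :
    ∃ j ∈ PySem.List.pyRange 0 (PySem.Str.len u) 1, pvHitAt u j k := by
  rw [PySem.Str.isIn_iff_infix] at hin
  obtain ⟨s, t, hst⟩ := hin
  have hlenu : u.toList.length = s.length + sub.toList.length + t.length := by
    rw [← hst]; simp; omega
  refine ⟨(s.length : Int), ?_, ⟨(sub.toList.length : Int), ?_, ?_⟩⟩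
  · rw [PySem.List.mem_pyRange_one]
    have : PySem.Str.len u = (u.toList.length : Int) := by simp [PySem.Str.len_eq]
    rw [this]
    constructor
    · positivity
    · omega
  · simp only [List.mem_cons, List.not_mem_nil, or_false]
    rcases hlen with h | h | h <;> rw [h] <;> simp
  · have hslice : PySem.Str.slice u (some (s.length : Int))
        (some ((s.length : Int) + (sub.toList.length : Int))) = sub := by
      have h1 : (PySem.Str.slice u (some (s.length : Int))
          (some ((s.length : Int) + (sub.toList.length : Int)))).toList = sub.toList := by
        rw [PySem.Str.toList_slice, PySem.Chars.slice_eq_listSlice, PySem.List.slice_natCast_add, ← hst]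
        rw [show s ++ sub.toList ++ t = s ++ (sub.toList ++ t) from by simp]
        rw [List.drop_left, List.take_left]
      simpa using congrArg String.ofList h1
    rw [hslice, hget]

theorem pv_dispatch (i : Int) (hits : List String) : hits.Nodup → (∀ k ∈ hits, k ∈ pvKeys) →
    ∀ v1 v2 v3 v4 v5 v6 v7 v8 v9 : List Int,
    hits.foldl (fun d key => d.modify key [] (fun xs => xs ++ [i])) (pvMk v1 v2 v3 v4 v5 v6 v7 v8 v9) =
    pvMk (v1 ++ if "visual" ∈ hits then [i] else []) (v2 ++ if "auditory" ∈ hits then [i] else [])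
      (v3 ++ if "prefrontal" ∈ hits then [i] else []) (v4 ++ if "hippocampus" ∈ hits then [i] else [])
      (v5 ++ if "amygdala" ∈ hits then [i] else []) (v6 ++ if "basal_ganglia" ∈ hits then [i] else [])
      (v7 ++ if "thalamus" ∈ hits then [i] else []) (v8 ++ if "temporal" ∈ hits then [i] else [])
      (v9 ++ if "motor" ∈ hits then [i] else []) := by
  induction hits with
  | nil => intro _ _ v1 v2 v3 v4 v5 v6 v7 v8 v9; simp
  | cons k t ih =>
    intro hnd hsub v1 v2 v3 v4 v5 v6 v7 v8 v9
    have hk : k ∈ pvKeys := hsub k (List.mem_cons_self ..)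
    have hnt : k ∉ t := (List.nodup_cons.1 hnd).1
    have hndt : t.Nodup := (List.nodup_cons.1 hnd).2
    have hsubt : ∀ x ∈ t, x ∈ pvKeys := fun x hx => hsub x (List.mem_cons_of_mem _ hx)
    rw [List.foldl_cons]
    simp only [pvKeys, List.mem_cons, List.not_mem_nil, or_false] at hk
    rcases hk with h | h | h | h | h | h | h | h | h <;> subst h
    · rw [show (pvMk v1 v2 v3 v4 v5 v6 v7 v8 v9).modify "visual" [] (fun xs => xs ++ [i]) = pvMk (v1 ++ [i]) v2 v3 v4 v5 v6 v7 v8 v9 from rfl,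
        ih hndt hsubt]
      simp [pvMk, List.mem_cons, hnt]
    · rw [show (pvMk v1 v2 v3 v4 v5 v6 v7 v8 v9).modify "auditory" [] (fun xs => xs ++ [i]) = pvMk v1 (v2 ++ [i]) v3 v4 v5 v6 v7 v8 v9 from rfl,
        ih hndt hsubt]
      simp [pvMk, List.mem_cons, hnt]
    · rw [show (pvMk v1 v2 v3 v4 v5 v6 v7 v8 v9).modify "prefrontal" [] (fun xs => xs ++ [i]) = pvMk v1 v2 (v3 ++ [i]) v4 v5 v6 v7 v8 v9 from rfl,
        ih hndt hsubt]
      simp [pvMk, List.mem_cons, hnt]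
    · rw [show (pvMk v1 v2 v3 v4 v5 v6 v7 v8 v9).modify "hippocampus" [] (fun xs => xs ++ [i]) = pvMk v1 v2 v3 (v4 ++ [i]) v5 v6 v7 v8 v9 from rfl,
        ih hndt hsubt]
      simp [pvMk, List.mem_cons, hnt]
    · rw [show (pvMk v1 v2 v3 v4 v5 v6 v7 v8 v9).modify "amygdala" [] (fun xs => xs ++ [i]) = pvMk v1 v2 v3 v4 (v5 ++ [i]) v6 v7 v8 v9 from rfl,
        ih hndt hsubt]
      simp [pvMk, List.mem_cons, hnt]
    · rw [show (pvMk v1 v2 v3 v4 v5 v6 v7 v8 v9).modify "basal_ganglia" [] (fun xs => xs ++ [i]) = pvMk v1 v2 v3 v4 v5 (v6 ++ [i]) v7 v8 v9 from rfl,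
        ih hndt hsubt]
      simp [pvMk, List.mem_cons, hnt]
    · rw [show (pvMk v1 v2 v3 v4 v5 v6 v7 v8 v9).modify "thalamus" [] (fun xs => xs ++ [i]) = pvMk v1 v2 v3 v4 v5 v6 (v7 ++ [i]) v8 v9 from rfl,
        ih hndt hsubt]
      simp [pvMk, List.mem_cons, hnt]
    · rw [show (pvMk v1 v2 v3 v4 v5 v6 v7 v8 v9).modify "temporal" [] (fun xs => xs ++ [i]) = pvMk v1 v2 v3 v4 v5 v6 v7 (v8 ++ [i]) v9 from rfl,
        ih hndt hsubt]
      simp [pvMk, List.mem_cons, hnt]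
    · rw [show (pvMk v1 v2 v3 v4 v5 v6 v7 v8 v9).modify "motor" [] (fun xs => xs ++ [i]) = pvMk v1 v2 v3 v4 v5 v6 v7 v8 (v9 ++ [i]) from rfl,
        ih hndt hsubt]
      simp [pvMk, List.mem_cons, hnt]


theorem pv_key_iff (u : String) (k : String) (pats : List String)
    (h1 : ∀ p ∈ pats, pvPat2Key.get? p = some k ∧
      (p.toList.length = 2 ∨ p.toList.length = 3 ∨ p.toList.length = 4))
    (h2 : ∀ sub, pvPat2Key.get? sub = some k → sub ∈ pats) :
    (k ∈ pvHits u ↔ (pats.any (fun p => PySem.Str.isIn p u)) = true) := by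
  rw [pv_mem_pvHits]
  constructor
  · rintro ⟨j, hj, hhit⟩
    have hj0 : 0 ≤ j := (PySem.List.mem_pyRange_one.1 hj).1
    obtain ⟨sub, hget, hin⟩ := pv_hitAt_to_isIn u j k hj0 hhit
    exact List.any_eq_true.2 ⟨sub, h2 sub hget, hin⟩
  · intro h
    obtain ⟨p, hp, hin⟩ := List.any_eq_true.1 h
    obtain ⟨hget, hlen⟩ := h1 p hp
    exact pv_isIn_to_hitAt u p k hget hlen hin

theorem pv_iff_visual (u : String) :
    ("visual" ∈ pvHits u ↔ (["V1", "V2", "VAC"].any (fun p => PySem.Str.isIn p u)) = true) :=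
  pv_key_iff u "visual" ["V1", "V2", "VAC"] (by decide)
    (fun sub h => by
      have := pv_get?_cases sub _ h
      simp at this ⊢
      tauto)

theorem pv_iff_auditory (u : String) :
    ("auditory" ∈ pvHits u ↔ (["A1", "A2"].any (fun p => PySem.Str.isIn p u)) = true) :=
  pv_key_iff u "auditory" ["A1", "A2"] (by decide)
    (fun sub h => by
      have := pv_get?_cases sub _ h
      simp at this ⊢
      tauto)

theorem pv_iff_prefrontal (u : String) :
    ("prefrontal" ∈ pvHits u ↔ (["PFC", "FEF"].any (fun p => PySem.Str.isIn p u)) = true) :=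
  pv_key_iff u "prefrontal" ["PFC", "FEF"] (by decide)
    (fun sub h => by
      have := pv_get?_cases sub _ h
      simp at this ⊢
      tauto)

theorem pv_iff_hippocampus (u : String) :
    ("hippocampus" ∈ pvHits u ↔ (["HC", "PHC"].any (fun p => PySem.Str.isIn p u)) = true) :=
  pv_key_iff u "hippocampus" ["HC", "PHC"] (by decide)
    (fun sub h => by
      have := pv_get?_cases sub _ h
      simp at this ⊢
      tauto)

theorem pv_iff_amygdala (u : String) :
    ("amygdala" ∈ pvHits u ↔ (["AMYG"].any (fun p => PySem.Str.isIn p u)) = true) :=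
  pv_key_iff u "amygdala" ["AMYG"] (by decide)
    (fun sub h => by
      have := pv_get?_cases sub _ h
      simp at this ⊢
      tauto)

theorem pv_iff_basalganglia (u : String) :
    ("basal_ganglia" ∈ pvHits u ↔ (["BG"].any (fun p => PySem.Str.isIn p u)) = true) :=
  pv_key_iff u "basal_ganglia" ["BG"] (by decide)
    (fun sub h => by
      have := pv_get?_cases sub _ h
      simp at this ⊢
      tauto)

theorem pv_iff_thalamus (u : String) :
    ("thalamus" ∈ pvHits u ↔ (["TM"].any (fun p => PySem.Str.isIn p u)) = true) :=
  pv_key_iff u "thalamus" ["TM"] (by decide)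
    (fun sub h => by
      have := pv_get?_cases sub _ h
      simp at this ⊢
      tauto)

theorem pv_iff_temporal (u : String) :
    ("temporal" ∈ pvHits u ↔ (["TC"].any (fun p => PySem.Str.isIn p u)) = true) :=
  pv_key_iff u "temporal" ["TC"] (by decide)
    (fun sub h => by
      have := pv_get?_cases sub _ h
      simp at this ⊢
      tauto)

theorem pv_iff_motor (u : String) :
    ("motor" ∈ pvHits u ↔ (["M1", "PMC"].any (fun p => PySem.Str.isIn p u)) = true) :=
  pv_key_iff u "motor" ["M1", "PMC"] (by decide)
    (fun sub h => by
      have := pv_get?_cases sub _ h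
      simp at this ⊢
      tauto)


theorem pv_stepB (i : Int) (u : String) (v1 v2 v3 v4 v5 v6 v7 v8 v9 : List Int) :
    (pvHits u).foldl (fun d key => d.modify key [] (fun xs => xs ++ [i])) (pvMk v1 v2 v3 v4 v5 v6 v7 v8 v9) =
    pvMk (v1 ++ if (["V1", "V2", "VAC"].any (fun p => PySem.Str.isIn p u)) = true then [i] else []) (v2 ++ if (["A1", "A2"].any (fun p => PySem.Str.isIn p u)) = true then [i] else []) (v3 ++ if (["PFC", "FEF"].any (fun p => PySem.Str.isIn p u)) = true then [i] else []) (v4 ++ if (["HC", "PHC"].any (fun p => PySem.Str.isIn p u)) = true then [i] else []) (v5 ++ if (["AMYG"].any (fun p => PySem.Str.isIn p u)) = true then [i] else []) (v6 ++ if (["BG"].any (fun p => PySem.Str.isIn p u)) = true then [i] else []) (v7 ++ if (["TM"].any (fun p => PySem.Str.isIn p u)) = true then [i] else []) (v8 ++ if (["TC"].any (fun p => PySem.Str.isIn p u)) = true then [i] else []) (v9 ++ if (["M1", "PMC"].any (fun p => PySem.Str.isIn p u)) = true then [i] else []) := by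
  rw [pv_dispatch i (pvHits u) (pv_nodup_pvHits u) (pv_sub_pvHits u)]
  simp only [pv_iff_visual u, pv_iff_auditory u, pv_iff_prefrontal u, pv_iff_hippocampus u,
    pv_iff_amygdala u, pv_iff_basalganglia u, pv_iff_thalamus u, pv_iff_temporal u,
    pv_iff_motor u]

-- the matching indices one pattern list collects from an enumerated list
def pvMatches (pats : List String) (es : List (Int × String)) : List Int :=
  (es.filter (fun il => pats.any (fun p => PySem.Str.isIn p (PySem.Str.upper il.2)))).map (fun il => il.1)

theorem pvMatches_cons (pats : List String) (il : Int × String) (es : List (Int × String)) :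
    pvMatches pats (il :: es) =
      (if (pats.any (fun p => PySem.Str.isIn p (PySem.Str.upper il.2))) = true then [il.1] else []) ++
        pvMatches pats es := by
  simp only [pvMatches, List.filter_cons]
  split <;> simp_all

theorem pv_loop (es : List (Int × String)) : ∀ v1 v2 v3 v4 v5 v6 v7 v8 v9 : List Int,
    es.foldl (fun d il =>
      let u := PySem.Str.upper il.2
      (pvHits u).foldl (fun d key => d.modify key [] (fun xs => xs ++ [il.1])) d)
      (pvMk v1 v2 v3 v4 v5 v6 v7 v8 v9) =
    pvMk (v1 ++ pvMatches ["V1", "V2", "VAC"] es)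
      (v2 ++ pvMatches ["A1", "A2"] es)
      (v3 ++ pvMatches ["PFC", "FEF"] es)
      (v4 ++ pvMatches ["HC", "PHC"] es)
      (v5 ++ pvMatches ["AMYG"] es)
      (v6 ++ pvMatches ["BG"] es)
      (v7 ++ pvMatches ["TM"] es)
      (v8 ++ pvMatches ["TC"] es)
      (v9 ++ pvMatches ["M1", "PMC"] es) := by
  induction es with
  | nil => intro v1 v2 v3 v4 v5 v6 v7 v8 v9; simp [pvMatches]
  | cons il es ih =>
    intro v1 v2 v3 v4 v5 v6 v7 v8 v9
    rw [List.foldl_cons]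
    show (es.foldl _ ((pvHits (PySem.Str.upper il.2)).foldl _ _)) = _
    rw [pv_stepB, ih]
    simp [pvMatches_cons, List.append_assoc]

-- ===== VERDICT (by name: the statement is the Claim_ definition above) =====
set_option maxHeartbeats 2000000 in
theorem classify_regions_spec : Claim_equal_classify_regions := by
  intro labels _
  unfold Spec_classify_regions classify_regions classify_regions_alt
  have h0 : pvKeys.foldl (fun d k => d.insert k ([] : List Int)) PySem.Dict.empty =
      pvMk [] [] [] [] [] [] [] [] [] := by rfl
  simp only [h0, pv_loop]
  simp [pvTable, pvMk, PySem.Dict.insert, PySem.Dict.contains, PySem.Dict.empty, pvMatches]
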